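-- pv_equiv track=rewrite | github.com/ebi-pf-team/interproscan6 | scripts/members/sfld/sfld_post_process.py | get_seq_pos_map
-- ===== SOURCE A (Python) =====
-- def get_seq_pos_map(seq):
--     pos_map = [0] * len(seq)
--     pos = 0
--     for i, c in enumerate(seq):
--         if c.isalpha():
--             pos_map[i] = pos
--             pos += 1
--         else:
--             pos_map[i] = -1
--     return pos_map
-- ===== SOURCE B (Python) =====
-- def get_seq_pos_map(seq):
--     n = len(seq)
--     prefix = [0] * (n + 1)
--     for i, c in enumerate(seq):
--         prefix[i + 1] = prefix[i] + (1 if c.isalpha() else 0)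
--     return [prefix[i] if seq[i].isalpha() else -1 for i in range(n)]
-- ===== Notes on version B (the rewrite author's own statement) =====
-- stated objective: alternative
-- what changed: Replaces the single loop threading a mutable counter with a two-pass decomposition: first an exclusive prefix-count table of alphabetic characters, then a separate comprehension reading that table.
import Mathlib
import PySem

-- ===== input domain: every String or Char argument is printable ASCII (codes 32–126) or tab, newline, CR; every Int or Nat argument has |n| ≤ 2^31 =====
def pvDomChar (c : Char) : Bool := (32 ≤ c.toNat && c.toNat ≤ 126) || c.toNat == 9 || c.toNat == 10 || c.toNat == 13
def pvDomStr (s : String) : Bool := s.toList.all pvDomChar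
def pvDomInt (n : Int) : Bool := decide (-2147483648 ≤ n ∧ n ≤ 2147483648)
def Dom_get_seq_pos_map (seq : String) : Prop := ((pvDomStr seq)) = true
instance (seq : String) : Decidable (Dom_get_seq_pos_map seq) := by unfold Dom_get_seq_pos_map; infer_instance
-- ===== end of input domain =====

-- B replaces A's single counter-threading loop by a two-pass decomposition (exclusive prefix-count table, then a lookup pass); same O(n) cost, alternative structure.

-- ===== PORT A =====
-- A walks the string once, threading a running counter 'pos' and writing positions in order
-- (the preallocated pos_map written left to right is the accumulated list).
def get_seq_pos_map (seq : String) : List Int :=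
  ((PySem.List.enumerate seq.toList).foldl
    (fun (st : List Int × Int) ic =>
      if PySem.Chars.isalpha ic.2 then (st.1 ++ [st.2], st.2 + 1)
      else (st.1 ++ [(-1 : Int)], st.2))
    ([], 0)).1

-- ===== PORT B =====
-- exclusive prefix counts: element i = number of alphabetic chars strictly before index i
def pvExclPrefix : List Char → Int → List Int
  | [], _ => []
  | c :: cs, acc => acc :: pvExclPrefix cs (acc + (if PySem.Chars.isalpha c then 1 else 0))

def get_seq_pos_map_alt (seq : String) : List Int :=
  (seq.toList.zip (pvExclPrefix seq.toList 0)).map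
    (fun p => if PySem.Chars.isalpha p.1 then p.2 else (-1 : Int))

-- ===== PRECONDITION & SPEC =====
def Spec_get_seq_pos_map (seq : String) (out : List Int) : Prop := out = get_seq_pos_map_alt seq
instance (seq : String) (out : List Int) : Decidable (Spec_get_seq_pos_map seq out) := by unfold Spec_get_seq_pos_map; infer_instance

-- ===== CLAIM (what is proved, stated in full; the proofs are below) =====
def Claim_equal_get_seq_pos_map : Prop := ∀ (seq : String), Dom_get_seq_pos_map seq → Spec_get_seq_pos_map seq (get_seq_pos_map seq)

-- ===== LEMMAS AND PROOFS =====
theorem pv_fold_eq (l : List Char) : ∀ (s : Int) (acc : List Int) (pos : Int),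
    (((PySem.List.enumerate l s).foldl
      (fun (st : List Int × Int) ic =>
        if PySem.Chars.isalpha ic.2 then (st.1 ++ [st.2], st.2 + 1)
        else (st.1 ++ [(-1 : Int)], st.2))
      (acc, pos)).1)
    = acc ++ (l.zip (pvExclPrefix l pos)).map
        (fun p => if PySem.Chars.isalpha p.1 then p.2 else (-1 : Int)) := by
  induction l with
  | nil => intro s acc pos; simp [PySem.List.enumerate_nil]
  | cons c cs ih =>
    intro s acc pos
    rw [PySem.List.enumerate_cons]
    by_cases h : PySem.Chars.isalpha c = true
    · simp [pvExclPrefix, h, ih]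
    · simp only [Bool.not_eq_true] at h
      simp [pvExclPrefix, h, ih]

-- ===== VERDICT (by name: the statement is the Claim_ definition above) =====
theorem get_seq_pos_map_spec : Claim_equal_get_seq_pos_map := by
  intro seq _
  unfold Spec_get_seq_pos_map get_seq_pos_map get_seq_pos_map_alt
  exact pv_fold_eq seq.toList 0 [] 0
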